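-- pv_equiv track=rewrite | github.com/pisterlabs/promptset | data/scraping-2.0/repos/ChampPG~Wallace/bin~speech.py | format_event_string
-- ===== SOURCE A (Python) =====
-- def format_event_string(events):
--     """Formats a list of events into a human-readable string.
--
--     Args:
--     events (list): List of events to be formatted."""
--     event_string = ""
--     # Iterate over events and concatenate them into a single string
--     for i, event in enumerate(events):
--         if i < len(events) - 2:
--             event_string += event + ", next event is "
--         else:
--             if i == len(events) - 1:
--                 event_string += event
--             else:
--                 event_string += event + ", then "
--     return event_string
-- ===== SOURCE B (Python) =====
-- def format_event_string(events):
--     if not events: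
--         return ""
--     if len(events) == 1:
--         return "" + events[0]
--     inner = ", next event is ".join(events[:-1])
--     return ", then ".join([inner, events[-1]])
-- ===== Notes on version B (the rewrite author's own statement) =====
-- stated objective: idiomatic
-- what changed: Replaces the index-comparison accumulator loop with explicit short cases plus slicing and two str.join calls (join the head group with ', next event is ', then join with ', then ' before the final event).
import Mathlib
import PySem

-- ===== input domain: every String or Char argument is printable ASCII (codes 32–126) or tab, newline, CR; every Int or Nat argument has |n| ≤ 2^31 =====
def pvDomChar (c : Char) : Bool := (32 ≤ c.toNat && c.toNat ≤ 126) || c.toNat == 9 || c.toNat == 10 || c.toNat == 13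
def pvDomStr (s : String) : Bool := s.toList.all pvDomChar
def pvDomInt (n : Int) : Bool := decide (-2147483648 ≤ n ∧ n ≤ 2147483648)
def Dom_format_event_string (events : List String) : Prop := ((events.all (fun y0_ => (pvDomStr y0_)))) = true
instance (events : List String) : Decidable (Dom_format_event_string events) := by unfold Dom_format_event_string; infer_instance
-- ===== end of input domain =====

-- B replaces A's index-comparison accumulator loop by explicit short cases plus slicing and two joins (idiomatic decomposition; str.join avoids repeated concatenation).

-- ===== PORT A =====
def format_event_string (events : List String) : String :=
  (PySem.List.enumerate events 0).foldl
    (fun event_string p =>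
      if p.1 < (events.length : Int) - 2 then
        event_string ++ (p.2 ++ ", next event is ")
      else if p.1 = (events.length : Int) - 1 then
        event_string ++ p.2
      else
        event_string ++ (p.2 ++ ", then ")) ""

-- ===== PORT B =====
def format_event_string_alt (events : List String) : String :=
  match events with
  | [] => ""
  | [e] => "" ++ e
  | _ :: _ :: _ =>
    -- events[-1] always exists in this branch; .getD "" only makes the lookup total
    let inner := PySem.Str.join ", next event is " (PySem.List.slice events none (some (-1)))
    PySem.Str.join ", then " [inner, (PySem.List.pyGet? events (-1)).getD ""]

-- ===== PRECONDITION & SPEC =====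
def Spec_format_event_string (events : List String) (out : String) : Prop := out = format_event_string_alt events
instance (events : List String) (out : String) : Decidable (Spec_format_event_string events out) := by unfold Spec_format_event_string; infer_instance

-- ===== CLAIM (what is proved, stated in full; the proofs are below) =====
def Claim_equal_format_event_string : Prop := ∀ (events : List String), Dom_format_event_string events → Spec_format_event_string events (format_event_string events)

-- ===== LEMMAS AND PROOFS =====

-- the string A's loop builds over the first len-2 events: each followed by ", next event is "
def pvJc : List String → String
  | [] => ""
  | x :: l => x ++ ", next event is " ++ pvJc l

theorem pv_join_cons₂ (s x b : String) (t : List String) :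
    PySem.Str.join s (x :: b :: t) = x ++ s ++ PySem.Str.join s (b :: t) := by
  apply String.toList_inj.mp
  simp [PySem.Str.join, PySem.Chars.join, List.intercalate]

theorem pv_join_singleton (s y : String) : PySem.Str.join s [y] = y := by
  apply String.toList_inj.mp
  simp [PySem.Str.join, PySem.Chars.join, List.intercalate]

theorem pv_join_concat (y : String) (l : List String) :
    PySem.Str.join ", next event is " (l ++ [y]) = pvJc l ++ y := by
  induction l with
  | nil => simp [pv_join_singleton, pvJc]
  | cons x l ih =>
    have hne : l ++ [y] ≠ [] := by simp
    obtain ⟨b, t, hbt⟩ := List.exists_cons_of_ne_nil hne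
    calc PySem.Str.join ", next event is " (x :: (l ++ [y]))
        = x ++ ", next event is " ++ PySem.Str.join ", next event is " (l ++ [y]) := by
          rw [hbt, pv_join_cons₂]
      _ = pvJc (x :: l) ++ y := by rw [ih]; simp [pvJc, String.append_assoc]

theorem pv_pyGet_last (xs : List String) (y z : String) :
    PySem.List.pyGet? (xs ++ [y, z]) (-1) = some z := by
  simp [PySem.List.pyGet?, PySem.List.pyIdx?]

theorem pv_fold_lt (n : Int) (l : List String) (s : Int) (acc : String)
    (h : s + l.length ≤ n - 2) :
    (PySem.List.enumerate l s).foldl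
      (fun event_string p =>
        if p.1 < n - 2 then event_string ++ (p.2 ++ ", next event is ")
        else if p.1 = n - 1 then event_string ++ p.2
        else event_string ++ (p.2 ++ ", then ")) acc
      = acc ++ pvJc l := by
  induction l generalizing s acc with
  | nil => simp [pvJc, PySem.List.enumerate_nil]
  | cons x l ih =>
    rw [PySem.List.enumerate_cons]
    simp only [List.foldl_cons]
    rw [if_pos (by simp at h; omega)]
    rw [ih (s + 1) _ (by simp at h ⊢; omega)]
    simp [pvJc, String.append_assoc]

theorem pv_A_char (l : List String) (y z : String) :
    format_event_string (l ++ [y, z]) = pvJc l ++ (y ++ ", then ") ++ z := by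
  unfold format_event_string
  rw [PySem.List.enumerate_append, List.foldl_append]
  rw [pv_fold_lt ((l ++ [y, z]).length : Int) l 0 "" (by simp)]
  rw [PySem.List.enumerate_cons, PySem.List.enumerate_cons, PySem.List.enumerate_nil]
  simp only [List.foldl_cons, List.foldl_nil]
  have hn : ((l ++ [y, z]).length : Int) = (l.length : Int) + 2 := by
    simp only [List.length_append, List.length_cons, List.length_nil]; push_cast; ring
  rw [hn]
  split_ifs <;> first
    | (exfalso; omega)
    | simp [String.append_assoc]

theorem pv_alt_cons₂ (a b : String) (t : List String) :
    format_event_string_alt (a :: b :: t) =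
      PySem.Str.join ", then "
        [PySem.Str.join ", next event is " (PySem.List.slice (a :: b :: t) none (some (-1))),
         (PySem.List.pyGet? (a :: b :: t) (-1)).getD ""] := rfl

theorem pv_B_char (l : List String) (y z : String) :
    format_event_string_alt (l ++ [y, z]) =
      PySem.Str.join ", next event is " (l ++ [y]) ++ ", then " ++ z := by
  obtain ⟨a, t, hat⟩ := List.exists_cons_of_ne_nil (show l ++ [y, z] ≠ [] by simp)
  have ht : t ≠ [] := by
    intro h
    have hlen := congrArg List.length hat
    rw [h] at hlen
    simp at hlen
  obtain ⟨b, t', hbt⟩ := List.exists_cons_of_ne_nil ht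
  rw [hat, hbt, pv_alt_cons₂, ← hbt, ← hat]
  rw [PySem.List.slice_to_neg_one]
  have hdl : (l ++ [y, z]).dropLast = l ++ [y] := by
    simp [List.dropLast_append_of_ne_nil]
  rw [hdl, pv_pyGet_last]
  rw [show (some z).getD "" = z from rfl]
  rw [pv_join_cons₂ _ _ _ [], pv_join_singleton]

-- ===== VERDICT (by name: the statement is the Claim_ definition above) =====
theorem format_event_string_spec : Claim_equal_format_event_string := by
  intro events _
  unfold Spec_format_event_string
  match events with
  | [] => rfl
  | [e] =>
    show format_event_string [e] = format_event_string_alt [e]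
    unfold format_event_string format_event_string_alt
    rw [PySem.List.enumerate_cons, PySem.List.enumerate_nil]
    simp
  | a :: b :: rest =>
    obtain ⟨l', z, hl'⟩ := (List.eq_nil_or_concat (a :: b :: rest)).resolve_left (by simp)
    obtain ⟨l, y, hl⟩ := (List.eq_nil_or_concat l').resolve_left (by
      intro h; rw [h] at hl'; simp at hl')
    have hE : a :: b :: rest = l ++ [y, z] := by
      rw [hl', hl]; simp
    rw [hE, pv_A_char, pv_B_char, pv_join_concat]
    simp [String.append_assoc]
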